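-- pv_equiv track=rewrite | github.com/don-alejandrino/aoc2025 | src/02.py | get_invalid_ids_part1
-- ===== SOURCE A (Python) =====
-- def get_invalid_ids_part1(id_range: tuple[int, int]) -> list[int]:
--     out = []
--     for i in range(id_range[0], id_range[1] + 1):
--         i_str = str(i)
--         i_digits = len(i_str)
--         first_half = i_str[:i_digits // 2]
--         second_half = i_str[i_digits // 2:]
--         if first_half == second_half:
--             out.append(i)
--
--     return out
-- ===== SOURCE B (Python) =====
-- def get_invalid_ids_part1(id_range):
--     lo, hi = id_range[0], id_range[1]
--     out = []
--     k = 1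
--     while 10 ** (k - 1) * (10 ** k + 1) <= hi:
--         base = 10 ** k + 1
--         x_lo = max(10 ** (k - 1), -((-lo) // base))
--         x_hi = min(10 ** k - 1, hi // base)
--         for x in range(x_lo, x_hi + 1):
--             out.append(x * base)
--         k += 1
--     return out
-- ===== Notes on version B (the rewrite author's own statement) =====
-- stated objective: faster
-- what changed: Instead of scanning every integer of the range and testing whether the decimal string's two halves are equal, B directly generates the doubled numbers x*(10^k+1) for each half-length k and clips each block to [lo, hi].
import Mathlib
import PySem

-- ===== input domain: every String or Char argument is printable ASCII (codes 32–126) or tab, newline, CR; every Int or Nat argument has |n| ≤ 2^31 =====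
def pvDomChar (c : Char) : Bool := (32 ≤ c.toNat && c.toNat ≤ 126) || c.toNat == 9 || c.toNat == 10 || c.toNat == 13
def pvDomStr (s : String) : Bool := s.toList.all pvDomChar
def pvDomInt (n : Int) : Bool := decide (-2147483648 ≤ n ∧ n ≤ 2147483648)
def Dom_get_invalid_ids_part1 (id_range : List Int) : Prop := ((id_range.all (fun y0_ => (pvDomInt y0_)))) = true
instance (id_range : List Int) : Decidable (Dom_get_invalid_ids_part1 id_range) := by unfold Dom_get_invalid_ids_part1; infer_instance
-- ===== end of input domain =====

-- B generates the "doubled" numbers x*(10^k+1) per half-length k and clips each block to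
-- [lo, hi] instead of scanning the whole range and comparing decimal-string halves (faster
-- as measured only when hi - lo is large compared to sqrt(hi)).

-- ===== PORT A =====
def get_invalid_ids_part1 (id_range : List Int) : List Int :=
  (PySem.List.pyRange (PySem.List.pyGetD id_range 0 0) (PySem.List.pyGetD id_range 1 0 + 1) 1).foldl
    (fun out i =>
      let i_str := PySem.Int.toChars i
      let i_digits : Int := i_str.length
      let first_half := PySem.List.slice i_str none (some (PySem.Int.floordiv i_digits 2))
      let second_half := PySem.List.slice i_str (some (PySem.Int.floordiv i_digits 2)) none
      if first_half = second_half then out ++ [i] else out) []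

-- ===== PORT B =====
-- termination helper for the while loop: the loop counter is bounded through the guard
lemma pv_nat_le_tenpow (k : Nat) : (k : Int) ≤ 10 ^ (k - 1) := by
  have h : k - 1 < 10 ^ (k - 1) := Nat.lt_pow_self (by norm_num)
  have : k ≤ 10 ^ (k - 1) := by omega
  exact_mod_cast this

-- the 'while 10**(k-1)*(10**k+1) <= hi' loop of Source B, state = (k, out)
def altLoop (lo hi : Int) (k : Nat) (out : List Int) : List Int :=
  if _h : (10 : Int) ^ (k - 1) * (10 ^ k + 1) ≤ hi then
    let base : Int := 10 ^ k + 1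
    let x_lo : Int := max ((10 : Int) ^ (k - 1)) (-(PySem.Int.floordiv (-lo) base))
    let x_hi : Int := min ((10 : Int) ^ k - 1) (PySem.Int.floordiv hi base)
    altLoop lo hi (k + 1) ((PySem.List.pyRange x_lo (x_hi + 1) 1).foldl (fun o x => o ++ [x * base]) out)
  else out
termination_by hi.toNat + 2 - k
decreasing_by
  have h1 : (10 : Int) ^ (k - 1) ≤ 10 ^ (k - 1) * (10 ^ k + 1) := by
    nlinarith [pow_nonneg (by norm_num : (0:Int) ≤ 10) (k - 1), pow_nonneg (by norm_num : (0:Int) ≤ 10) k]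
  have h2 : (k : Int) ≤ hi := le_trans (pv_nat_le_tenpow k) (le_trans h1 _h)
  omega

def get_invalid_ids_part1_alt (id_range : List Int) : List Int :=
  altLoop (PySem.List.pyGetD id_range 0 0) (PySem.List.pyGetD id_range 1 0) 1 []

-- ===== PRECONDITION & SPEC =====
-- Pre_ excludes exactly the lists of length < 2, on which the Python A raises IndexError.
def Pre_get_invalid_ids_part1 (id_range : List Int) : Prop := 2 ≤ id_range.length
instance (id_range : List Int) : Decidable (Pre_get_invalid_ids_part1 id_range) := by
  unfold Pre_get_invalid_ids_part1; infer_instance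
def pvWitness_get_invalid_ids_part1 : List Int := [5, 1300]

def Spec_get_invalid_ids_part1 (id_range : List Int) (out : List Int) : Prop := out = get_invalid_ids_part1_alt id_range
instance (id_range : List Int) (out : List Int) : Decidable (Spec_get_invalid_ids_part1 id_range out) := by unfold Spec_get_invalid_ids_part1; infer_instance

-- ===== CLAIM (what is proved, stated in full; the proofs are below) =====
def Claim_equal_get_invalid_ids_part1 : Prop := ∀ (id_range : List Int), Dom_get_invalid_ids_part1 id_range → Pre_get_invalid_ids_part1 id_range → Spec_get_invalid_ids_part1 id_range (get_invalid_ids_part1 id_range)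

-- ===== LEMMAS AND PROOFS =====

-- "i is some k-digit number x followed by the same x", the arithmetic form of A's string test
def IsDoubled (i : Int) : Prop :=
  ∃ (k : Nat) (x : Int), 1 ≤ k ∧ 10 ^ (k - 1) ≤ x ∧ x < 10 ^ k ∧ i = x * (10 ^ k + 1)

-- decimal digit characters of n, most significant first ([] for 0)
def dig (n : Nat) : List Char := ((Nat.digits 10 n).map Nat.digitChar).reverse

-- n zero-padded to exactly k digit characters
def padk : Nat → Nat → List Char
  | 0, _ => []
  | k + 1, a => padk k (a / 10) ++ [Nat.digitChar (a % 10)]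

lemma dig_zero : dig 0 = [] := by simp [dig]

lemma dig_step (n : Nat) (hn : 0 < n) : dig n = dig (n / 10) ++ [Nat.digitChar (n % 10)] := by
  unfold dig
  rw [Nat.digits_def' (by norm_num : (1:Nat) < 10) hn]
  simp

lemma toDigitsCore_eq (f n : Nat) (acc : List Char) (h : n < f) :
    Nat.toDigitsCore 10 f n acc = (if n = 0 then ['0'] else dig n) ++ acc := by
  induction f generalizing n acc with
  | zero => omega
  | succ f ih =>
    rw [Nat.toDigitsCore]
    by_cases h10 : n / 10 = 0
    · rw [if_pos h10]
      by_cases h0 : n = 0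
      · subst h0
        have hc : Nat.digitChar (0 % 10) = '0' := by decide
        rw [hc, if_pos rfl]
        rfl
      · rw [if_neg h0, dig_step n (by omega), h10, dig_zero]
        rfl
    · rw [if_neg h10]
      have hlt : n / 10 < f := by omega
      have hn0 : n ≠ 0 := by omega
      rw [ih (n / 10) _ hlt, if_neg h10, if_neg hn0, dig_step n (by omega), List.append_assoc]
      rfl

lemma toDigits_eq (n : Nat) : Nat.toDigits 10 n = if n = 0 then ['0'] else dig n := by
  unfold Nat.toDigits
  rw [toDigitsCore_eq (n + 1) n [] (Nat.lt_succ_self n)]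
  simp

lemma dig_length (n : Nat) : (dig n).length = (Nat.digits 10 n).length := by simp [dig]

lemma dig_length_eq_iff (n k : Nat) (hn : 1 ≤ n) (hk : 1 ≤ k) :
    (dig n).length = k ↔ 10 ^ (k - 1) ≤ n ∧ n < 10 ^ k := by
  rw [dig_length, Nat.length_digits 10 n (by norm_num) (by omega)]
  have hlog := Nat.log_eq_iff (b := 10) (n := n) (m := k - 1)
    (Or.inr ⟨by norm_num, by omega⟩)
  have hkk : k - 1 + 1 = k := by omega
  rw [hkk] at hlog
  constructor
  · intro h
    exact hlog.mp (by omega)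
  · intro h
    have := hlog.mpr h
    omega

lemma dig_split (m a k : Nat) (hm : 1 ≤ m) (ha : a < 10 ^ k) :
    dig (m * 10 ^ k + a) = dig m ++ padk k a := by
  induction k generalizing a with
  | zero =>
    have : a = 0 := by simpa using ha
    subst this
    simp [padk]
  | succ k ih =>
    have hp : (0:Nat) < 10 ^ k := pow_pos (by norm_num : (0:Nat) < 10) k
    have hNpos : 0 < m * 10 ^ (k + 1) + a := by
      have : (0:Nat) < 10 ^ (k+1) := pow_pos (by norm_num : (0:Nat) < 10) _
      nlinarith
    rw [dig_step _ hNpos]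
    have hdiv : (m * 10 ^ (k + 1) + a) / 10 = m * 10 ^ k + a / 10 := by
      rw [pow_succ, ← mul_assoc, Nat.add_comm, Nat.add_mul_div_right _ _ (by norm_num : (0:Nat) < 10),
        Nat.add_comm]
    have hmod : (m * 10 ^ (k + 1) + a) % 10 = a % 10 := by
      rw [pow_succ, ← mul_assoc, Nat.add_comm, Nat.add_mul_mod_self_right]
    have hlt : a / 10 < 10 ^ k := by
      rw [Nat.div_lt_iff_lt_mul (by norm_num : (0:Nat) < 10), ← pow_succ]; exact ha
    rw [hdiv, hmod, ih (a / 10) hlt]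
    simp [padk]

lemma padk_length (k a : Nat) : (padk k a).length = k := by
  induction k generalizing a with
  | zero => simp [padk]
  | succ k ih => simp [padk, ih]

lemma padk_eq_dig (k a : Nat) (hk : 1 ≤ k) (h1 : 10 ^ (k - 1) ≤ a) (h2 : a < 10 ^ k) :
    padk k a = dig a := by
  induction k generalizing a with
  | zero => omega
  | succ k ih =>
    rcases Nat.eq_zero_or_pos k with h0 | hpos
    · subst h0
      simp only [padk]
      have ha1 : 1 ≤ a := by simpa using h1
      have ha10 : a < 10 := by simpa using h2
      rw [dig_step a (by omega)]
      have : a / 10 = 0 := Nat.div_eq_of_lt ha10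
      rw [this, dig_zero]
    · have hp : (0:Nat) < 10 ^ (k - 1) := pow_pos (by norm_num : (0:Nat) < 10) _
      have h1' : 10 ^ k ≤ a := by simpa using h1
      have hap : 0 < a := lt_of_lt_of_le (pow_pos (by norm_num : (0:Nat) < 10) _) h1'
      have hdivlo : 10 ^ (k - 1) ≤ a / 10 := by
        rw [Nat.le_div_iff_mul_le (by norm_num : (0:Nat) < 10)]
        calc 10 ^ (k - 1) * 10 = 10 ^ (k - 1 + 1) := (pow_succ 10 (k-1)).symm
          _ = 10 ^ k := by congr 1; omega
          _ ≤ a := h1'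
      have hdivhi : a / 10 < 10 ^ k := by
        rw [Nat.div_lt_iff_lt_mul (by norm_num : (0:Nat) < 10), ← pow_succ]
        exact h2
      simp only [padk]
      rw [ih (a / 10) hpos hdivlo hdivhi, dig_step a hap]

lemma digitChar_inj (a b : Nat) (ha : a < 10) (hb : b < 10) :
    Nat.digitChar a = Nat.digitChar b → a = b := by
  have H : ∀ a < 10, ∀ b < 10, Nat.digitChar a = Nat.digitChar b → a = b := by
    set_option maxHeartbeats 1000000 in decide
  exact H a ha b hb

lemma padk_inj (k a b : Nat) (ha : a < 10 ^ k) (hb : b < 10 ^ k) :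
    padk k a = padk k b → a = b := by
  induction k generalizing a b with
  | zero =>
    intro _
    simp only [pow_zero, Nat.lt_one_iff] at ha hb
    omega
  | succ k ih =>
    intro h
    simp only [padk] at h
    obtain ⟨h1, h2⟩ := List.append_inj' h (by simp)
    have hmod : a % 10 = b % 10 := by
      simp only [List.cons.injEq] at h2
      exact digitChar_inj _ _ (Nat.mod_lt _ (by norm_num)) (Nat.mod_lt _ (by norm_num)) h2.1
    have hdiv : a / 10 = b / 10 := by
      apply ih _ _ _ _ h1
      · rw [Nat.div_lt_iff_lt_mul (by norm_num : (0:Nat) < 10), ← pow_succ]; exact ha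
      · rw [Nat.div_lt_iff_lt_mul (by norm_num : (0:Nat) < 10), ← pow_succ]; exact hb
    omega

lemma digitChar_ne_dash (x : Nat) : Nat.digitChar x ≠ '-' := by
  by_cases h : x < 16
  · have H : ∀ y < 16, Nat.digitChar y ≠ '-' := by decide
    exact H x h
  · have hx : Nat.digitChar x = '*' := by
      simp only [Nat.digitChar]
      rw [if_neg (by omega), if_neg (by omega), if_neg (by omega), if_neg (by omega),
        if_neg (by omega), if_neg (by omega), if_neg (by omega), if_neg (by omega),
        if_neg (by omega), if_neg (by omega), if_neg (by omega), if_neg (by omega),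
        if_neg (by omega), if_neg (by omega), if_neg (by omega), if_neg (by omega)]
    rw [hx]
    decide

lemma mem_dig_ne_dash (n : Nat) (c : Char) (hc : c ∈ dig n) : c ≠ '-' := by
  simp only [dig, List.mem_reverse, List.mem_map] at hc
  obtain ⟨d, _, rfl⟩ := hc
  exact digitChar_ne_dash d

-- the Nat-level heart: the two halves of the digit string are equal iff n = x·(10^k+1)
lemma nat_halves_iff (n : Nat) (hn : 1 ≤ n) :
    ((dig n).take ((dig n).length / 2) = (dig n).drop ((dig n).length / 2)) ↔
      ∃ k x : Nat, 1 ≤ k ∧ 10 ^ (k - 1) ≤ x ∧ x < 10 ^ k ∧ n = x * (10 ^ k + 1) := by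
  constructor
  · intro h
    set L := (dig n).length with hL
    have hLpos : 1 ≤ L := by
      rw [hL, dig_length]
      exact List.length_pos_iff.mpr (Nat.digits_ne_nil_iff_ne_zero.mpr (by omega))
    -- equality of lengths forces L even
    have hlen := congrArg List.length h
    simp only [List.length_take, List.length_drop, hL.symm] at hlen
    have hLk : L = 2 * (L / 2) := by omega
    set k := L / 2 with hk
    have hk1 : 1 ≤ k := by omega
    -- split n at 10^k
    have hp : (0:Nat) < 10 ^ k := pow_pos (by norm_num : (0:Nat) < 10) _
    have hbounds : 10 ^ (L - 1) ≤ n ∧ n < 10 ^ L :=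
      (dig_length_eq_iff n L (by omega) hLpos).mp rfl
    have hge : 10 ^ k ≤ n := by
      calc 10 ^ k ≤ 10 ^ (L - 1) := Nat.pow_le_pow_right (by norm_num) (by omega)
        _ ≤ n := hbounds.1
    set m := n / 10 ^ k with hm
    set a := n % 10 ^ k with ha
    have hm1 : 1 ≤ m := by
      rw [hm, Nat.le_div_iff_mul_le hp]; omega
    have halt : a < 10 ^ k := Nat.mod_lt _ hp
    have hsplit : n = m * 10 ^ k + a := by
      rw [hm, ha, Nat.mul_comm]
      exact (Nat.div_add_mod n (10 ^ k)).symm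
    have hdigs : dig n = dig m ++ padk k a := by
      rw [hsplit] at *
      exact dig_split m a k hm1 halt
    have hlm : (dig m).length = k := by
      have := congrArg List.length hdigs
      simp only [List.length_append, padk_length, hL.symm] at this
      omega
    have htake : (dig n).take k = dig m := by rw [hdigs]; exact List.take_left' hlm
    have hdrop : (dig n).drop k = padk k a := by rw [hdigs]; exact List.drop_left' hlm
    rw [htake, hdrop] at h
    -- m has exactly k digits
    have hmb : 10 ^ (k - 1) ≤ m ∧ m < 10 ^ k := (dig_length_eq_iff m k hm1 hk1).mp hlm
    have hma : m = a := by
      apply padk_inj k m a hmb.2 halt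
      rw [padk_eq_dig k m hk1 hmb.1 hmb.2]
      exact h
    exact ⟨k, m, hk1, hmb.1, hmb.2, by rw [hsplit, ← hma]; ring⟩
  · rintro ⟨k, x, hk1, hx1, hx2, rfl⟩
    have hx0 : 1 ≤ x := le_trans (pow_pos (by norm_num : (0:Nat) < 10) _) hx1
    have hdigs : dig (x * (10 ^ k + 1)) = dig x ++ dig x := by
      have : x * (10 ^ k + 1) = x * 10 ^ k + x := by ring
      rw [this, dig_split x x k hx0 hx2, padk_eq_dig k x hk1 hx1 hx2]
    have hlx : (dig x).length = k := (dig_length_eq_iff x k hx0 hk1).mpr ⟨hx1, hx2⟩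
    rw [hdigs]
    have hlen : (dig x ++ dig x).length = 2 * k := by simp [hlx]; ring
    rw [hlen]
    have h2k : 2 * k / 2 = k := by omega
    rw [h2k, List.take_left' hlx, List.drop_left' hlx]

lemma halves_iff (i : Int) :
    ((PySem.Int.toChars i).take ((PySem.Int.toChars i).length / 2) =
      (PySem.Int.toChars i).drop ((PySem.Int.toChars i).length / 2)) ↔ IsDoubled i := by
  have hpos10 : ∀ k : Nat, (0:Int) < 10 ^ k := fun k => pow_pos (by norm_num) k
  rcases lt_trichotomy i 0 with hneg | rfl | hpos
  · -- negative: the first char is '-', no digit char equals it; and IsDoubled forces i > 0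
    constructor
    · intro h
      exfalso
      have hne : i.natAbs ≠ 0 := by omega
      have hs : PySem.Int.toChars i = '-' :: dig i.natAbs := by
        simp only [PySem.Int.toChars, if_pos hneg, toDigits_eq, if_neg hne]
      set t := dig i.natAbs with ht
      have htp : 1 ≤ t.length := by
        rw [ht, dig_length]
        exact List.length_pos_iff.mpr (Nat.digits_ne_nil_iff_ne_zero.mpr hne)
      rw [hs] at h
      have hlen := congrArg List.length h
      simp only [List.length_take, List.length_drop] at hlen
      obtain ⟨k, hk1, hLk, hk2⟩ : ∃ k, 1 ≤ k ∧ ('-' :: t).length = 2 * k ∧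
          ('-' :: t).length / 2 = k := by
        refine ⟨('-' :: t).length / 2, ?_, ?_, rfl⟩ <;>
          · simp only [List.length_cons] at hlen ⊢
            omega
      rw [hk2] at h
      have h0 : (('-' :: t).take k)[0]? = some '-' := by
        rw [List.getElem?_take]
        rw [if_pos (by omega : (0:Nat) < k)]
        rfl
      have h1 : (('-' :: t).drop k)[0]? = t[k-1]? := by
        rw [List.getElem?_drop]
        rcases Nat.exists_eq_add_of_le hk1 with ⟨k', rfl⟩
        simp [Nat.add_comm]
      rw [h, h1] at h0
      have hkt : k - 1 < t.length := by
        simp only [List.length_cons] at hLk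
        omega
      rw [List.getElem?_eq_getElem hkt] at h0
      have hdash : t[k-1] = '-' := Option.some.inj h0
      exact mem_dig_ne_dash i.natAbs _ (hdash ▸ List.getElem_mem hkt) hdash
    · rintro ⟨k, x, hk1, hx1, hx2, rfl⟩
      exfalso
      have : (0:Int) < x * (10 ^ k + 1) := by
        have := hpos10 (k - 1)
        nlinarith [hpos10 k]
      omega
  · -- zero
    constructor
    · intro h
      have hz : PySem.Int.toChars 0 = ['0'] := by decide
      rw [hz] at h
      simp at h
    · rintro ⟨k, x, hk1, hx1, hx2, h⟩
      exfalso
      have hx0 : (0:Int) < x := lt_of_lt_of_le (hpos10 (k-1)) hx1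
      have : (0:Int) < x * (10 ^ k + 1) := by nlinarith [hpos10 k]
      omega
  · -- positive: reduce to the Nat lemma
    have hne : i.toNat ≠ 0 := by omega
    have hs : PySem.Int.toChars i = dig i.toNat := by
      simp only [PySem.Int.toChars, if_neg (by omega : ¬ i < 0), toDigits_eq, if_neg hne]
    rw [hs, nat_halves_iff i.toNat (by omega)]
    constructor
    · rintro ⟨k, x, hk1, hx1, hx2, hval⟩
      refine ⟨k, (x : Int), hk1, ?_, ?_, ?_⟩
      · exact_mod_cast hx1
      · exact_mod_cast hx2
      · have : i = (i.toNat : Int) := by omega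
        rw [this, hval]; push_cast; ring
    · rintro ⟨k, x, hk1, hx1, hx2, hval⟩
      have hx0 : (0:Int) ≤ x := le_of_lt (lt_of_lt_of_le (hpos10 (k-1)) hx1)
      refine ⟨k, x.toNat, hk1, ?_, ?_, ?_⟩
      · have h' : ((10 ^ (k - 1) : Nat) : Int) ≤ (x.toNat : Int) := by
          rw [Int.toNat_of_nonneg hx0]
          exact_mod_cast hx1
        exact_mod_cast h'
      · have h' : (x.toNat : Int) < ((10 ^ k : Nat) : Int) := by
          rw [Int.toNat_of_nonneg hx0]
          exact_mod_cast hx2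
        exact_mod_cast h'
      · have : (i.toNat : Int) = ((x.toNat : Int)) * (10 ^ k + 1) := by
          rw [Int.toNat_of_nonneg hx0]
          omega
        exact_mod_cast this

-- A as a filter of the range
lemma portA_eq_filter (lo hi : Int) :
    (PySem.List.pyRange lo (hi + 1) 1).foldl
      (fun out i =>
        let i_str := PySem.Int.toChars i
        let i_digits : Int := i_str.length
        let first_half := PySem.List.slice i_str none (some (PySem.Int.floordiv i_digits 2))
        let second_half := PySem.List.slice i_str (some (PySem.Int.floordiv i_digits 2)) none
        if first_half = second_half then out ++ [i] else out) [] =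
    (PySem.List.pyRange lo (hi + 1) 1).filter
      (fun i => decide ((PySem.Int.toChars i).take ((PySem.Int.toChars i).length / 2) =
        (PySem.Int.toChars i).drop ((PySem.Int.toChars i).length / 2))) := by
  have step : ∀ (i : Int),
      (PySem.List.slice (PySem.Int.toChars i) none
          (some (PySem.Int.floordiv ((PySem.Int.toChars i).length : Int) 2)) =
        PySem.List.slice (PySem.Int.toChars i)
          (some (PySem.Int.floordiv ((PySem.Int.toChars i).length : Int) 2)) none) ↔
      ((PySem.Int.toChars i).take ((PySem.Int.toChars i).length / 2) =
        (PySem.Int.toChars i).drop ((PySem.Int.toChars i).length / 2)) := by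
    intro i
    have hfd : PySem.Int.floordiv ((PySem.Int.toChars i).length : Int) 2 =
        (((PySem.Int.toChars i).length / 2 : Nat) : Int) := by
      exact_mod_cast PySem.Int.floordiv_natCast (PySem.Int.toChars i).length 2
    rw [hfd, PySem.List.slice_to_natCast, PySem.List.slice_from_natCast]
  rw [PySem.List.foldl_append_ite_eq_filter
      (fun i => PySem.List.slice (PySem.Int.toChars i) none
          (some (PySem.Int.floordiv ((PySem.Int.toChars i).length : Int) 2)) =
        PySem.List.slice (PySem.Int.toChars i)
          (some (PySem.Int.floordiv ((PySem.Int.toChars i).length : Int) 2)) none)]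
  rw [List.nil_append]
  apply List.filter_congr
  intro i _
  simp only [decide_eq_decide]
  exact step i

-- B-side arithmetic brackets
lemma ceil_le_iff (lo b x : Int) (hb : 0 < b) : -(PySem.Int.floordiv (-lo) b) ≤ x ↔ lo ≤ x * b := by
  rw [PySem.Int.floordiv_eq_ediv_of_pos hb, neg_le, Int.le_ediv_iff_mul_le hb]
  constructor <;> intro h <;> nlinarith

lemma le_fdiv_iff (hi b x : Int) (hb : 0 < b) : x ≤ PySem.Int.floordiv hi b ↔ x * b ≤ hi := by
  rw [PySem.Int.floordiv_eq_ediv_of_pos hb, Int.le_ediv_iff_mul_le hb]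

lemma guard_mono (k k' : Nat) (h : k ≤ k') :
    (10 : Int) ^ (k - 1) * (10 ^ k + 1) ≤ 10 ^ (k' - 1) * (10 ^ k' + 1) := by
  have h1 : (10 : Int) ^ (k - 1) ≤ 10 ^ (k' - 1) :=
    pow_le_pow_right₀ (by norm_num) (by omega)
  have h2 : (10 : Int) ^ k ≤ 10 ^ k' := pow_le_pow_right₀ (by norm_num) h
  have p1 : (0:Int) < 10 ^ (k - 1) := pow_pos (by norm_num) _
  have p2 : (0:Int) < 10 ^ k := pow_pos (by norm_num) _
  nlinarith

-- the guard bounds the loop counter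
lemma guard_imp (hi : Int) (k : Nat) (h : (10 : Int) ^ (k - 1) * (10 ^ k + 1) ≤ hi) :
    (k : Int) ≤ hi := by
  have h1 : (10 : Int) ^ (k - 1) ≤ 10 ^ (k - 1) * (10 ^ k + 1) := by
    nlinarith [pow_nonneg (by norm_num : (0:Int) ≤ 10) (k - 1),
      pow_nonneg (by norm_num : (0:Int) ≤ 10) k]
  exact le_trans (pv_nat_le_tenpow k) (le_trans h1 h)

-- one unfolding of the while loop
lemma altLoop_eq (lo hi : Int) (k : Nat) (out : List Int) :
    altLoop lo hi k out =
      if (10 : Int) ^ (k - 1) * (10 ^ k + 1) ≤ hi then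
        altLoop lo hi (k + 1)
          ((PySem.List.pyRange (max ((10 : Int) ^ (k - 1)) (-(PySem.Int.floordiv (-lo) (10 ^ k + 1))))
              (min ((10 : Int) ^ k - 1) (PySem.Int.floordiv hi (10 ^ k + 1)) + 1) 1).foldl
            (fun o x => o ++ [x * (10 ^ k + 1)]) out)
      else out := by
  rw [altLoop]
  split_ifs with h <;> rfl

lemma altLoop_out (lo hi : Int) (k : Nat) (out : List Int) :
    altLoop lo hi k out = out ++ altLoop lo hi k [] := by
  have H : ∀ m k, hi.toNat + 2 - k ≤ m → ∀ out : List Int,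
      altLoop lo hi k out = out ++ altLoop lo hi k [] := by
    intro m
    induction m with
    | zero =>
      intro k hk out
      have hg : ¬ (10 : Int) ^ (k - 1) * (10 ^ k + 1) ≤ hi := by
        intro h
        have := guard_imp hi k h
        omega
      rw [altLoop_eq, if_neg hg, altLoop_eq, if_neg hg]
      simp
    | succ m ih =>
      intro k hk out
      rw [altLoop_eq lo hi k out, altLoop_eq lo hi k []]
      by_cases hg : (10 : Int) ^ (k - 1) * (10 ^ k + 1) ≤ hi
      · rw [if_pos hg, if_pos hg]
        have hkm : hi.toNat + 2 - (k + 1) ≤ m := by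
          have := guard_imp hi k hg
          omega
        rw [ih (k + 1) hkm, ih (k + 1) hkm
          ((PySem.List.pyRange (max ((10 : Int) ^ (k - 1)) (-(PySem.Int.floordiv (-lo) (10 ^ k + 1))))
            (min ((10 : Int) ^ k - 1) (PySem.Int.floordiv hi (10 ^ k + 1)) + 1) 1).foldl
            (fun o x => o ++ [x * (10 ^ k + 1)]) [])]
        rw [PySem.List.foldl_append_singleton_eq_map, PySem.List.foldl_append_singleton_eq_map]
        simp
      · rw [if_neg hg, if_neg hg]
        simp
  exact H (hi.toNat + 2) k (by omega) out

lemma mem_altLoop (lo hi : Int) (k : Nat) (y : Int) :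
    y ∈ altLoop lo hi k [] ↔
      (∃ (k' : Nat) (x : Int), k ≤ k' ∧ 10 ^ (k' - 1) ≤ x ∧ x < 10 ^ k' ∧
        y = x * (10 ^ k' + 1)) ∧ lo ≤ y ∧ y ≤ hi := by
  -- if a doubled number with half-length k' ≥ k is ≤ hi then the guard at k holds
  have hguard_of : ∀ (kk k' : Nat) (x : Int), kk ≤ k' → 10 ^ (k' - 1) ≤ x →
      x * (10 ^ k' + 1) ≤ hi → (10 : Int) ^ (kk - 1) * (10 ^ kk + 1) ≤ hi := by
    intro kk k' x hkk' hx hle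
    refine le_trans (guard_mono kk k' hkk') (le_trans ?_ hle)
    have : (0:Int) < 10 ^ k' + 1 := by positivity
    nlinarith
  have H : ∀ m k, hi.toNat + 2 - k ≤ m →
      (y ∈ altLoop lo hi k [] ↔
        (∃ (k' : Nat) (x : Int), k ≤ k' ∧ 10 ^ (k' - 1) ≤ x ∧ x < 10 ^ k' ∧
          y = x * (10 ^ k' + 1)) ∧ lo ≤ y ∧ y ≤ hi) := by
    intro m
    induction m with
    | zero =>
      intro k hk
      have hg : ¬ (10 : Int) ^ (k - 1) * (10 ^ k + 1) ≤ hi := by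
        intro h
        have := guard_imp hi k h
        omega
      rw [altLoop_eq, if_neg hg]
      simp only [List.not_mem_nil, false_iff]
      rintro ⟨⟨k', x, hkk', hx1, hx2, rfl⟩, hlo, hhi⟩
      exact hg (hguard_of k k' x hkk' hx1 hhi)
    | succ m ih =>
      intro k hk
      rw [altLoop_eq]
      by_cases hg : (10 : Int) ^ (k - 1) * (10 ^ k + 1) ≤ hi
      · rw [if_pos hg]
        rw [altLoop_out, PySem.List.foldl_append_singleton_eq_map, List.nil_append,
          List.mem_append]
        have hkm : hi.toNat + 2 - (k + 1) ≤ m := by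
          have := guard_imp hi k hg
          omega
        rw [ih (k + 1) hkm]
        have hbase : (0:Int) < 10 ^ k + 1 := by positivity
        constructor
        · rintro (hy | ⟨⟨k', x, hkk', hx1, hx2, rfl⟩, hlo, hhi⟩)
          · simp only [List.mem_map, PySem.List.mem_pyRange_one] at hy
            obtain ⟨x, ⟨hxlo, hxhi⟩, rfl⟩ := hy
            rw [max_le_iff] at hxlo
            have hxhi' : x ≤ min ((10 : Int) ^ k - 1) (PySem.Int.floordiv hi (10 ^ k + 1)) := by omega
            rw [le_min_iff] at hxhi'
            obtain ⟨hxa, hxb⟩ := hxhi'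
            refine ⟨⟨k, x, le_refl k, hxlo.1, by omega, rfl⟩, ?_, ?_⟩
            · exact (ceil_le_iff lo _ x hbase).mp hxlo.2
            · exact (le_fdiv_iff hi _ x hbase).mp hxb
          · exact ⟨⟨k', x, by omega, hx1, hx2, rfl⟩, hlo, hhi⟩
        · rintro ⟨⟨k', x, hkk', hx1, hx2, rfl⟩, hlo, hhi⟩
          rcases Nat.eq_or_lt_of_le hkk' with rfl | hlt
          · left
            simp only [List.mem_map, PySem.List.mem_pyRange_one]
            refine ⟨x, ⟨?_, ?_⟩, rfl⟩
            · rw [max_le_iff]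
              exact ⟨hx1, (ceil_le_iff lo _ x hbase).mpr hlo⟩
            · have h1 : x ≤ (10 : Int) ^ k - 1 := by omega
              have h2 : x ≤ PySem.Int.floordiv hi (10 ^ k + 1) :=
                (le_fdiv_iff hi _ x hbase).mpr hhi
              rw [Int.lt_add_one_iff, le_min_iff]
              exact ⟨h1, h2⟩
          · right
            exact ⟨⟨k', x, by omega, hx1, hx2, rfl⟩, hlo, hhi⟩
      · rw [if_neg hg]
        simp only [List.not_mem_nil, false_iff]
        rintro ⟨⟨k', x, hkk', hx1, hx2, rfl⟩, hlo, hhi⟩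
        exact hg (hguard_of k k' x hkk' hx1 hhi)
  exact H (hi.toNat + 2) k (by omega)

lemma pairwise_altLoop (lo hi : Int) (k : Nat) :
    (altLoop lo hi k []).Pairwise (· < ·) := by
  have H : ∀ m k, hi.toNat + 2 - k ≤ m → (altLoop lo hi k []).Pairwise (· < ·) := by
    intro m
    induction m with
    | zero =>
      intro k hk
      have hg : ¬ (10 : Int) ^ (k - 1) * (10 ^ k + 1) ≤ hi := by
        intro h
        have := guard_imp hi k h
        omega
      rw [altLoop_eq, if_neg hg]
      exact List.Pairwise.nil
    | succ m ih =>
      intro k hk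
      rw [altLoop_eq]
      by_cases hg : (10 : Int) ^ (k - 1) * (10 ^ k + 1) ≤ hi
      · rw [if_pos hg]
        rw [altLoop_out, PySem.List.foldl_append_singleton_eq_map, List.nil_append]
        have hkm : hi.toNat + 2 - (k + 1) ≤ m := by
          have := guard_imp hi k hg
          omega
        rw [List.pairwise_append]
        have hbase : (0:Int) < 10 ^ k + 1 := by positivity
        refine ⟨?_, ih (k + 1) hkm, ?_⟩
        · -- the block itself is strictly increasing
          refine List.Pairwise.map _ ?_ (PySem.List.pairwise_lt_pyRange_one _ _)
          intro a b hab
          exact mul_lt_mul_of_pos_right hab hbase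
        · -- every element of the block is below every later element
          intro y hy z hz
          simp only [List.mem_map, PySem.List.mem_pyRange_one] at hy
          obtain ⟨x, ⟨hxlo, hxhi⟩, rfl⟩ := hy
          have hxk : x ≤ (10 : Int) ^ k - 1 := by
            have := le_min_iff.mp (Int.lt_add_one_iff.mp hxhi)
            exact this.1
          rw [mem_altLoop] at hz
          obtain ⟨⟨k', x', hkk', hx1, hx2, rfl⟩, _, _⟩ := hz
          have p1 : (0:Int) < 10 ^ k := pow_pos (by norm_num) _
          have p2 : (0:Int) < 10 ^ (k' - 1) := pow_pos (by norm_num) _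
          have hy_ub : x * (10 ^ k + 1) ≤ 10 ^ k * 10 ^ k - 1 := by nlinarith
          have hz_lb : (10 : Int) ^ (k' - 1) * 10 ^ k' ≤ x' * (10 ^ k' + 1) := by nlinarith
          have e1 : (10 : Int) ^ k ≤ 10 ^ (k' - 1) := pow_le_pow_right₀ (by norm_num) (by omega)
          have e2 : (10 : Int) ^ k ≤ 10 ^ k' := pow_le_pow_right₀ (by norm_num) (by omega)
          nlinarith
      · rw [if_neg hg]
        exact List.Pairwise.nil
  exact H (hi.toNat + 2) k (by omega)

-- ===== VERDICT (by name: the statement is the Claim_ definition above) =====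
theorem get_invalid_ids_part1_spec : Claim_equal_get_invalid_ids_part1 := by
  intro id_range _ _
  unfold Spec_get_invalid_ids_part1 get_invalid_ids_part1 get_invalid_ids_part1_alt
  set lo := PySem.List.pyGetD id_range 0 0 with hlo
  set hi := PySem.List.pyGetD id_range 1 0 with hhi
  rw [portA_eq_filter lo hi]
  -- both sides are strictly increasing lists with the same members
  have hA : ((PySem.List.pyRange lo (hi + 1) 1).filter
      (fun i => decide ((PySem.Int.toChars i).take ((PySem.Int.toChars i).length / 2) =
        (PySem.Int.toChars i).drop ((PySem.Int.toChars i).length / 2)))).Pairwise (· < ·) :=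
    List.Pairwise.filter _ (PySem.List.pairwise_lt_pyRange_one _ _)
  have hB : (altLoop lo hi 1 []).Pairwise (· < ·) := pairwise_altLoop lo hi 1
  have hmem : ∀ a : Int, a ∈ (PySem.List.pyRange lo (hi + 1) 1).filter
      (fun i => decide ((PySem.Int.toChars i).take ((PySem.Int.toChars i).length / 2) =
        (PySem.Int.toChars i).drop ((PySem.Int.toChars i).length / 2))) ↔
      a ∈ altLoop lo hi 1 [] := by
    intro a
    rw [List.mem_filter, mem_altLoop, PySem.List.mem_pyRange_one, decide_eq_true_eq, halves_iff]
    unfold IsDoubled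
    constructor
    · rintro ⟨⟨h1, h2⟩, k, x, hk, hx1, hx2, rfl⟩
      exact ⟨⟨k, x, hk, hx1, hx2, rfl⟩, h1, by omega⟩
    · rintro ⟨⟨k, x, hk, hx1, hx2, rfl⟩, h1, h2⟩
      exact ⟨⟨h1, by omega⟩, k, x, hk, hx1, hx2, rfl⟩
  have hperm := (List.perm_ext_iff_of_nodup
    (hA.imp (fun h => ne_of_lt h)) (hB.imp (fun h => ne_of_lt h))).mpr hmem
  exact List.Perm.eq_of_pairwise (fun a b _ _ h1 h2 => by omega) hA hB hperm
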